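-- pv_equiv track=rewrite | github.com/WillanHurtado-Dev-Pent/recursion_py | PRACTICO RECURSIVIDAD.py | eliminarPrim
-- ===== SOURCE A (Python) =====
-- def esSeparador(car):
--     return (car==" " or car=="," or car==";" or car=="." or car=="\n" or car=="\t")
--
-- def eliminarPrim(cad):
--     tama=len(cad)
--     if (tama==2):
--         return ""
--     else:
--         if (esSeparador(cad[tama-2]) and not  (esSeparador(cad[tama-1]))):
--             return eliminarPrim(cad[:tama-1])
--         else:
--             return (eliminarPrim(cad[:tama-1]))+cad[tama-1]
-- ===== SOURCE B (Python) =====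
-- def esSeparador(car):
--     return (car==" " or car=="," or car==";" or car=="." or car=="\n" or car=="\t")
--
-- def eliminarPrim(cad):
--     # single linear pass: the first two characters are always dropped; a character
--     # at index j >= 2 is kept unless it is a non-separator preceded by a separator
--     out = []
--     for j in range(2, len(cad)):
--         if not (esSeparador(cad[j-1]) and not esSeparador(cad[j])):
--             out.append(cad[j])
--     return "".join(out)
-- ===== Notes on version B (the rewrite author's own statement) =====
-- stated objective: faster
-- what changed: Replaces the tail-recursive peel-one-character-with-full-slice-copy recursion by a single left-to-right pass that keeps cad[j] for j>=2 unless it is a non-separator preceded by a separator, joined once at the end.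
import Mathlib
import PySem

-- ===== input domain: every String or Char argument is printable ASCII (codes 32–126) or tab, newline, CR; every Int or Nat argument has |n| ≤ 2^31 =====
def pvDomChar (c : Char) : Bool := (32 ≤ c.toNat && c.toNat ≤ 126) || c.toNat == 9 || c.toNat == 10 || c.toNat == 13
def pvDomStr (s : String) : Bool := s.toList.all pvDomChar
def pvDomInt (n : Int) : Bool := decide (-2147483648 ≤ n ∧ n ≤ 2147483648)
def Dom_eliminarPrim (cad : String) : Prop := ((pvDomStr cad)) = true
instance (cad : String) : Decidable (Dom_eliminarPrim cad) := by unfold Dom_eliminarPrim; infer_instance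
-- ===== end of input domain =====

-- B replaces A's slice-copying end recursion by one linear pass over consecutive character pairs (measured faster, asymptotic).


-- ===== PORT A =====
def esSep (car : Char) : Bool :=
  car == ' ' || car == ',' || car == ';' || car == '.' || car == '\n' || car == '\t'

-- A's recursion on the character list: tama = length; base case tama == 2 → "";
-- otherwise look at cad[tama-2] and cad[tama-1] and recurse on cad[:tama-1].
-- For length < 2 Python raises IndexError (excluded by Pre_); the port returns [] there.
def eliminarPrimAux (cs : List Char) : List Char :=
  if cs.length = 2 then []
  else if _h : cs.length < 2 then []  -- Python raises IndexError here; outside Pre_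
  else
    let last := cs.getD (cs.length - 1) ' '    -- cad[tama-1]
    let prev := cs.getD (cs.length - 2) ' '    -- cad[tama-2]
    if esSep prev && !(esSep last) then eliminarPrimAux cs.dropLast
    else eliminarPrimAux cs.dropLast ++ [last]
termination_by cs.length
decreasing_by all_goals (simp only [List.length_dropLast]; omega)

def eliminarPrim (cad : String) : String := String.ofList (eliminarPrimAux cad.toList)

-- ===== PORT B =====
-- B's loop: for j in range(2, len(cad)) look at the pair (cad[j-1], cad[j]);
-- these pairs are exactly tail.zip tail.tail; keep the second component
-- unless it is a non-separator preceded by a separator.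
def eliminarPrimAltAux (ps : List (Char × Char)) : List Char :=
  ps.filterMap fun p => if esSep p.1 && !(esSep p.2) then none else some p.2

def eliminarPrim_alt (cad : String) : String :=
  String.ofList (eliminarPrimAltAux (cad.toList.tail.zip cad.toList.tail.tail))

-- ===== PRECONDITION & SPEC =====
-- Pre_ excludes exactly the strings of length < 2, on which A's recursion reaches the empty string and raises IndexError.
def Pre_eliminarPrim (cad : String) : Prop := 2 ≤ cad.toList.length
instance (cad : String) : Decidable (Pre_eliminarPrim cad) := by unfold Pre_eliminarPrim; infer_instance
def pvWitness_eliminarPrim : String := "hola mundo"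

def Spec_eliminarPrim (cad : String) (out : String) : Prop := out = eliminarPrim_alt cad
instance (cad : String) (out : String) : Decidable (Spec_eliminarPrim cad out) := by unfold Spec_eliminarPrim; infer_instance

-- ===== CLAIM (what is proved, stated in full; the proofs are below) =====
def Claim_equal_eliminarPrim : Prop := ∀ (cad : String), Dom_eliminarPrim cad → Pre_eliminarPrim cad → Spec_eliminarPrim cad (eliminarPrim cad)

-- ===== LEMMAS AND PROOFS =====
-- zipping a list with its own tail, after appending one element to both, appends the pair (last, new)
theorem zip_snoc {α : Type} (xs : List α) (hx : xs ≠ []) (c : α) :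
    (xs ++ [c]).zip (xs.tail ++ [c]) = xs.zip xs.tail ++ [(xs.getLast hx, c)] := by
  have hlen : xs.dropLast.length = xs.tail.length := by simp
  calc (xs ++ [c]).zip (xs.tail ++ [c])
      = (xs.dropLast ++ [xs.getLast hx, c]).zip (xs.tail ++ [c]) := by
        rw [show ([xs.getLast hx, c] : List α) = [xs.getLast hx] ++ [c] from rfl,
          ← List.append_assoc, List.dropLast_append_getLast]
    _ = xs.dropLast.zip xs.tail ++ [(xs.getLast hx, c)] := by
        rw [List.zip_append hlen]; rfl
    _ = xs.zip xs.tail ++ [(xs.getLast hx, c)] := by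
        have h2 : xs.zip xs.tail = xs.dropLast.zip xs.tail := by
          calc xs.zip xs.tail = (xs.dropLast ++ [xs.getLast hx]).zip (xs.tail ++ []) := by
                rw [List.dropLast_append_getLast, List.append_nil]
            _ = xs.dropLast.zip xs.tail := by rw [List.zip_append hlen]; simp
        rw [h2]

-- B's pair list of ds ++ [c]: the pairs of ds plus the final pair (last of ds, c)
theorem pairs_concat (ds : List Char) (c : Char) (h : 2 ≤ ds.length) (hdne : ds ≠ []) :
    (ds ++ [c]).tail.zip (ds ++ [c]).tail.tail
      = ds.tail.zip ds.tail.tail ++ [(ds.getLast hdne, c)] := by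
  cases ds with
  | nil => exact absurd rfl hdne
  | cons d0 ds' =>
    have hne : ds' ≠ [] := by
      intro hn; subst hn; simp at h
    simp only [List.cons_append, List.tail_cons]
    rw [show (ds' ++ [c]).tail = ds'.tail ++ [c] by
        cases ds' with | nil => exact absurd rfl hne | cons a t => rfl]
    rw [zip_snoc ds' hne c]
    rw [show (d0 :: ds').getLast hdne = ds'.getLast hne from List.getLast_cons hne]

-- main invariant: A's back-to-front recursion equals B's filter of consecutive pairs
theorem key (cs : List Char) (h : 2 ≤ cs.length) :
    eliminarPrimAux cs = eliminarPrimAltAux (cs.tail.zip cs.tail.tail) := by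
  induction cs using List.reverseRecOn with
  | nil => simp at h
  | append_singleton ds c ih =>
    by_cases h2 : ds.length ≤ 1
    · have hlen : (ds ++ [c]).length = 2 := by simp at h ⊢; omega
      rw [eliminarPrimAux]
      simp only [hlen]
      match ds, h2 with
      | [d], _ => simp [eliminarPrimAltAux]
      | [], _ => simp at h
    · have hds : 2 ≤ ds.length := by omega
      have hdne : ds ≠ [] := by intro hn; subst hn; simp at hds
      have hne2 : ¬ (ds ++ [c]).length = 2 := by simp; omega
      have hnlt : ¬ (ds ++ [c]).length < 2 := by simp; omega
      rw [eliminarPrimAux]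
      simp only [hne2, hnlt, if_false]
      have hgetlast : (ds ++ [c]).getD ((ds ++ [c]).length - 1) ' ' = c := by simp
      have hidx : (ds ++ [c]).length - 2 = ds.length - 1 := by simp
      have hgetprev : (ds ++ [c]).getD ((ds ++ [c]).length - 2) ' '
          = ds.getLast hdne := by
        rw [hidx, List.getD_eq_getElem _ _ (by simp),
          List.getElem_append_left (by omega), List.getLast_eq_getElem]
      rw [pairs_concat ds c hds hdne, List.dropLast_concat]
      simp only [hgetlast, hgetprev, eliminarPrimAltAux, List.filterMap_append, ih hds]
      by_cases hc : esSep (ds.getLast hdne) && !(esSep c)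
      · simp only [Bool.and_eq_true, Bool.not_eq_true'] at hc
        simp [hc.1, hc.2]
      · simp only [Bool.and_eq_true, Bool.not_eq_true'] at hc
        simp [hc]

-- ===== VERDICT (by name: the statement is the Claim_ definition above) =====
theorem eliminarPrim_spec : Claim_equal_eliminarPrim := by
  intro cad _ hpre
  unfold Spec_eliminarPrim eliminarPrim eliminarPrim_alt
  rw [key cad.toList hpre]
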